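-- pv_equiv track=rewrite | github.com/quang-g/buffet_style_investing_agent | phase_1/chunking_with_llm_localpos_batch_windowed_v6_c.py | _snap_to_whitespace_before
-- ===== SOURCE A (Python) =====
-- def _clamp_int(x: int, lo: int, hi: int) -> int:
--     return max(lo, min(hi, x))
--
-- def _snap_to_whitespace_before(text: str, pos: int, window: int = 800) -> int:
--     """Snap position to nearest whitespace boundary before."""
--     n = len(text)
--     pos = _clamp_int(pos, 0, n)
--     left = max(0, pos - window)
--     k = pos
--     while k > left:
--         if text[k - 1].isspace():
--             return k
--         k -= 1
--     return pos
-- ===== SOURCE B (Python) =====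
-- def _snap_to_whitespace_before(text: str, pos: int, window: int = 800) -> int:
--     """Snap position to nearest whitespace boundary before (forward accumulator pass)."""
--     n = len(text)
--     pos = max(0, min(n, pos))
--     left = max(0, pos - window)
--     best = pos
--     for i, ch in enumerate(text[left:pos]):
--         if ch.isspace():
--             best = left + i + 1
--     return best
-- ===== Notes on version B (the rewrite author's own statement) =====
-- stated objective: alternative
-- what changed: Replaces the backward early-exit scan (return at the first whitespace found scanning right-to-left) by a single forward pass over the window slice that keeps the rightmost whitespace boundary in an accumulator.
import Mathlib
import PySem

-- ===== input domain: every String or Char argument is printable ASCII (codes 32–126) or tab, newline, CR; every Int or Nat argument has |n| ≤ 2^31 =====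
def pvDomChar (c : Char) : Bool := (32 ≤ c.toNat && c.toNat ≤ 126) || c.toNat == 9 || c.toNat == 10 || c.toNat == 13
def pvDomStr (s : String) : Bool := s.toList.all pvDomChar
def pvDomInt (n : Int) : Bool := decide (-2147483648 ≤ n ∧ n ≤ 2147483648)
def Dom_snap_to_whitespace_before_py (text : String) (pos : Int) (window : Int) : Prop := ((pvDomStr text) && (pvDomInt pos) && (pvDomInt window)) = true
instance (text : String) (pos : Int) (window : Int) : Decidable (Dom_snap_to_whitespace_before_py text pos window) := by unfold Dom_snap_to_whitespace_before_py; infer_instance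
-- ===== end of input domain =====

-- B replaces A's backward early-exit scan by a forward pass over the window slice
-- that accumulates the rightmost whitespace boundary (objective: alternative).


-- ===== PORT A =====
-- helper _clamp_int
def pvClampInt (x lo hi : Int) : Int := max lo (min hi x)

-- A's while loop: k counts down from pos to left; c = (k - left) as a Nat, so k = left + c.
-- The pyGet? index left + c is always in range here (0 ≤ left, left + c < pos ≤ len);
-- the none branch is unreachable and only makes the function total.
def pvSnapLoopA (cs : List Char) (left pos : Int) : Nat → Int
  | 0 => pos
  | c + 1 =>
    match PySem.List.pyGet? cs (left + c) with
    | some ch => if PySem.Chars.isspace ch then left + (c + 1) else pvSnapLoopA cs left pos c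
    | none => pos

def snap_to_whitespace_before_py (text : String) (pos : Int) (window : Int) : Int :=
  let cs := text.toList
  let n : Int := cs.length
  let pos' := pvClampInt pos 0 n
  let left := max 0 (pos' - window)
  pvSnapLoopA cs left pos' (pos' - left).toNat

-- ===== PORT B =====
def snap_to_whitespace_before_py_alt (text : String) (pos : Int) (window : Int) : Int :=
  let cs := text.toList
  let n : Int := cs.length
  let pos' := max 0 (min n pos)
  let left := max 0 (pos' - window)
  (PySem.List.enumerate (PySem.List.slice cs (some left) (some pos')) 0).foldl
    (fun best p => if PySem.Chars.isspace p.2 then left + p.1 + 1 else best) pos'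

-- ===== PRECONDITION & SPEC =====
def Spec_snap_to_whitespace_before_py (text : String) (pos : Int) (window : Int) (out : Int) : Prop := out = snap_to_whitespace_before_py_alt text pos window
instance (text : String) (pos : Int) (window : Int) (out : Int) : Decidable (Spec_snap_to_whitespace_before_py text pos window out) := by unfold Spec_snap_to_whitespace_before_py; infer_instance

-- ===== CLAIM (what is proved, stated in full; the proofs are below) =====
def Claim_equal_snap_to_whitespace_before_py : Prop := ∀ (text : String) (pos : Int) (window : Int), Dom_snap_to_whitespace_before_py text pos window → Spec_snap_to_whitespace_before_py text pos window (snap_to_whitespace_before_py text pos window)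

-- ===== LEMMAS AND PROOFS =====

-- Backward early-exit scan over cs[left : left+c] equals the forward rightmost-whitespace fold.
lemma pvSnapLoop_eq_foldl (cs : List Char) (l pos : Int) (c : Nat)
    (h0 : 0 ≤ l) (h1 : l + c ≤ cs.length) :
    pvSnapLoopA cs l pos c =
      (PySem.List.enumerate (PySem.List.slice cs (some l) (some (l + c))) 0).foldl
        (fun best p => if PySem.Chars.isspace p.2 then l + p.1 + 1 else best) pos := by
  induction c generalizing pos with
  | zero =>
      simp only [Nat.cast_zero, add_zero]
      rw [PySem.List.slice_toNat cs h0 h0]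
      simp [pvSnapLoopA]
  | succ c ih =>
      have hc : l + (c : Int) < (cs.length : Int) := by omega
      have hidx : (l + c).toNat < cs.length := by omega
      have hget : PySem.List.pyGet? cs (l + c) = some cs[(l + c).toNat] := by
        simp [PySem.List.pyGet?, PySem.List.pyIdx?, hc,
          show (0:Int) ≤ l + (c:Int) from by omega]
      have hslice : PySem.List.slice cs (some l) (some (l + (c + 1 : Nat)))
          = PySem.List.slice cs (some l) (some (l + c)) ++ [cs[(l + c).toNat]] := by
        rw [PySem.List.slice_toNat cs h0 (by omega), PySem.List.slice_toNat cs h0 (by omega)]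
        have e1 : (l + (c + 1 : Nat)).toNat - l.toNat = (l + c).toNat - l.toNat + 1 := by omega
        rw [e1, List.take_add_one]
        have hd : ((l + c).toNat - l.toNat) < (cs.drop l.toNat).length := by
          simp [List.length_drop]; omega
        have : (cs.drop l.toNat)[(l + c).toNat - l.toNat]? = some cs[(l + c).toNat] := by
          rw [List.getElem?_eq_getElem hd]
          congr 1
          rw [List.getElem_drop]
          congr 1
          omega
        simp [this]
      have hlen : (PySem.List.slice cs (some l) (some (l + c))).length = c := by
        rw [PySem.List.slice_toNat cs h0 (by omega)]
        simp [List.length_drop]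
        omega
      rw [hslice, PySem.List.enumerate_append, List.foldl_append]
      simp only [hlen]
      show pvSnapLoopA cs l pos (c + 1) = _
      rw [pvSnapLoopA, hget]
      by_cases hsp : PySem.Chars.isspace cs[(l + c).toNat]
      · simp [hsp]
        ring
      · simp [hsp]
        exact ih pos (by omega)
-- ===== VERDICT (by name: the statement is the Claim_ definition above) =====
theorem snap_to_whitespace_before_py_spec : Claim_equal_snap_to_whitespace_before_py := by
  intro text pos window _
  unfold Spec_snap_to_whitespace_before_py
  unfold snap_to_whitespace_before_py snap_to_whitespace_before_py_alt pvClampInt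
  dsimp only
  generalize text.toList = cs
  set p := max (0:Int) (min (cs.length : Int) pos) with hp
  set l := max (0:Int) (p - window) with hl
  have h0 : (0:Int) ≤ l := le_max_left _ _
  have hp0 : (0:Int) ≤ p := le_max_left _ _
  have hpn : p ≤ (cs.length : Int) := by omega
  by_cases hcase : l ≤ p
  · have hc : (((p - l).toNat : Int)) = p - l := by omega
    rw [pvSnapLoop_eq_foldl cs l p (p - l).toNat h0 (by omega)]
    have e : l + (((p - l).toNat : Int)) = p := by omega
    rw [e]
  · have hz : (p - l).toNat = 0 := by omega
    rw [hz]
    have e2 : PySem.List.slice cs (some l) (some p) = [] := by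
      rw [PySem.List.slice_toNat cs h0 hp0]
      have : p.toNat - l.toNat = 0 := by omega
      simp [this]
    rw [e2]
    simp [pvSnapLoopA, PySem.List.enumerate]
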